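-- pv_equiv track=rewrite | github.com/LinkDry/Validated-Intent-Compilation-for-Constrained-Routing-in-LEO-Mega-Constellations | intent/verifier.py | _certify_f3
-- ===== SOURCE A (Python) =====
-- from collections import deque
--
-- def _certify_f3(adj, src, dst, max_hops):
--     """F3: BFS with hop limit. Returns (path, hops) or None."""
--     if src not in adj or dst not in adj:
--         return None
--     visited = {src: (None, 0)}
--     q = deque([(src, 0)])
--     while q:
--         u, h = q.popleft()
--         if u == dst:
--             path = []
--             n = dst
--             while n is not None:
--                 path.append(n)
--                 n = visited[n][0]
--             return (list(reversed(path)), h)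
--         if h >= max_hops:
--             continue
--         for v, _ in adj.get(u, []):
--             if v not in visited:
--                 visited[v] = (u, h + 1)
--                 q.append((v, h + 1))
--     return None
-- ===== SOURCE B (Python) =====
-- def _certify_f3(adj, src, dst, max_hops):
--     """F3 check, two-phase: build the full BFS layer decomposition using only a
--     seen set (no parent pointers, no queue of hop-tagged nodes), then look up
--     dst's layer index and reconstruct the path backwards by searching each
--     earlier layer for the first node adjacent to the current one."""
--     if src not in adj or dst not in adj:
--         return None
--     layers = [[src]]
--     seen = {src}
--     while True:
--         nxt = []
--         for u in layers[-1]: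
--             for v, _ in adj.get(u, []):
--                 if v not in seen:
--                     seen.add(v)
--                     nxt.append(v)
--         if not nxt:
--             break
--         layers.append(nxt)
--     k = None
--     for i, layer in enumerate(layers):
--         if dst in layer:
--             k = i
--             break
--     if k is None or (k > 0 and k > max_hops):
--         return None
--     path = [dst]
--     cur = dst
--     for h in range(k - 1, -1, -1):
--         for u in layers[h]:
--             if any(v == cur for v, _ in adj.get(u, [])):
--                 path.append(u)
--                 cur = u
--                 break
--     return (path[::-1], k)
-- ===== Notes on version B (the rewrite author's own statement) =====
-- stated objective: alternative
-- what changed: Replaces A's single-pass hop-tagged FIFO BFS with parent pointers by a two-phase algorithm: first build the complete BFS layer decomposition using only a seen set (no parents, no hop tags, no early exit), then look up dst's layer index k, compare it with max_hops, and reconstruct the path backwards by searching each earlier layer for the first node adjacent to the current one.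
import Mathlib
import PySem

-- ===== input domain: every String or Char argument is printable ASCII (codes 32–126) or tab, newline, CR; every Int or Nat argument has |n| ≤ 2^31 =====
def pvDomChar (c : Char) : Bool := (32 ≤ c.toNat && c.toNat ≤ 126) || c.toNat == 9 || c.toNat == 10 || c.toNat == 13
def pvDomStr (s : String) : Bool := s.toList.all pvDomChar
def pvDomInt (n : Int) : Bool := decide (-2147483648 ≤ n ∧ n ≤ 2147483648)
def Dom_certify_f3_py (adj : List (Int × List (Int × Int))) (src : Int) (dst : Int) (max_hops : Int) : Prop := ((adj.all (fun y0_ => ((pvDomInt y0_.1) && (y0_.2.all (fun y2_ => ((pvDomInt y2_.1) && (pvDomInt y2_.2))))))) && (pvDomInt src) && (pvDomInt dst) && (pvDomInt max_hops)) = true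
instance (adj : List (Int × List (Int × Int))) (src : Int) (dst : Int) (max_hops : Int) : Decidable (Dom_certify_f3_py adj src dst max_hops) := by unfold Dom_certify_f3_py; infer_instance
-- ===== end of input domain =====

-- B is a two-phase alternative: it builds the complete BFS layer decomposition with only a
-- seen set (no parent pointers, no hop-tagged queue), then looks up dst's layer index and
-- reconstructs the path backwards by searching each earlier layer for the first adjacent node.

-- ===== PORT A =====
-- path = []; n = dst; while n is not None: path.append(n); n = visited[n][0]
-- (fuel-guarded walk up the parent chain; the fuel passed is always enough on reachable states)
def reconA (v : PySem.Dict Int (Option Int × Int)) : Nat → Int → List Int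
  | 0, _ => []
  | f + 1, n =>
    match v.get? n with
    | some (some p, _) => n :: reconA v f p
    | _ => [n]

-- body of "for v, _ in adj.get(u, []): if v not in visited: visited[v] = (u, h+1); q.append((v, h+1))"
def stepA (u h : Int) (st : PySem.Dict Int (Option Int × Int) × List (Int × Int)) (vi : Int × Int) :
    PySem.Dict Int (Option Int × Int) × List (Int × Int) :=
  if (st.1.get? vi.1).isSome then st
  else (st.1.insert vi.1 (some u, h + 1), st.2 ++ [(vi.1, h + 1)])

-- the "while q" loop; fuel is a termination guard only (never exhausted on reachable states)
def loopA (d : PySem.Dict Int (List (Int × Int))) (dst mh : Int) :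
    Nat → PySem.Dict Int (Option Int × Int) → List (Int × Int) → Option (List Int × Int)
  | 0, _, _ => none
  | f + 1, v, q =>
    match q with
    | [] => none
    | (u, h) :: rest =>
      if u = dst then some ((reconA v (mh.toNat + 2) dst).reverse, h)
      else if mh ≤ h then loopA d dst mh f v rest
      else
        let st := (d.getD u []).foldl (stepA u h) (v, rest)
        loopA d dst mh f st.1 st.2

def fuelA (d : PySem.Dict Int (List (Int × Int))) (mh : Int) : Nat :=
  (mh.toNat + 1) * ((d.items.map (fun it => it.2.length)).sum + 2)

def certify_f3_py (adj : List (Int × List (Int × Int))) (src : Int) (dst : Int) (max_hops : Int) : Option (List Int × Int) :=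
  let d := PySem.Dict.ofList adj
  if !d.contains src || !d.contains dst then none
  else loopA d dst max_hops (fuelA d max_hops) ((PySem.Dict.empty).insert src (none, 0)) [(src, 0)]

-- ===== PORT B =====
-- inner body "if v not in seen: seen.add(v); nxt.append(v)"
def stepL (st : PySem.Set Int × List Int) (vi : Int × Int) : PySem.Set Int × List Int :=
  if st.1.contains vi.1 then st else (st.1.add vi.1, st.2 ++ [vi.1])

-- "nxt = []; for u in layers[-1]: for v, _ in adj.get(u, []): …"
def expandL (d : PySem.Dict Int (List (Int × Int))) (layer : List Int) (seen : PySem.Set Int) :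
    PySem.Set Int × List Int :=
  layer.foldl (fun st u => (d.getD u []).foldl stepL st) (seen, [])

-- the "while True" layer-building loop; accRev holds the layers newest-first (Python's
-- layers list reversed); fuel is a termination guard only (each round adds a new node)
def buildL (d : PySem.Dict Int (List (Int × Int))) :
    Nat → PySem.Set Int → List (List Int) → List (List Int)
  | 0, _, accRev => accRev
  | f + 1, seen, accRev =>
    let st := expandL d (accRev.headD []) seen
    if st.2 = [] then accRev else buildL d f st.1 (st.2 :: accRev)

-- "for i, layer in enumerate(layers): if dst in layer: k = i; break"
def findK (dst : Int) : List (List Int) → Nat → Option Nat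
  | [], _ => none
  | layer :: rest, i => if layer.contains dst then some i else findK dst rest (i + 1)

-- "for u in layers[h]: if any(v == cur for v, _ in adj.get(u, [])): … break"
def pickB (d : PySem.Dict Int (List (Int × Int))) (cur : Int) : List Int → Option Int
  | [] => none
  | u :: rest => if (d.getD u []).any (fun vi => vi.1 == cur) then some u else pickB d cur rest

-- "for h in range(k - 1, -1, -1): …" walking the layers below dst's layer, newest-first
def bwdB (d : PySem.Dict Int (List (Int × Int))) :
    List (List Int) → Int → List Int → List Int
  | [], _, path => path
  | layer :: rest, cur, path =>
    match pickB d cur layer with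
    | some u => bwdB d rest u (path ++ [u])
    | none => bwdB d rest cur path

def fuelB (d : PySem.Dict Int (List (Int × Int))) : Nat :=
  (d.items.map (fun it => it.2.length)).sum + 1

def certify_f3_py_alt (adj : List (Int × List (Int × Int))) (src : Int) (dst : Int) (max_hops : Int) : Option (List Int × Int) :=
  let d := PySem.Dict.ofList adj
  if !d.contains src || !d.contains dst then none
  else
    match findK dst ((buildL d (fuelB d) (PySem.Set.ofList [src]) [[src]]).reverse) 0 with
    | none => none
    | some k =>
      if 0 < k ∧ max_hops < (k : Int) then none
      else some ((bwdB d ((((buildL d (fuelB d) (PySem.Set.ofList [src]) [[src]]).reverse).take k).reverse) dst [dst]).reverse, (k : Int))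

-- ===== PRECONDITION & SPEC =====
def Spec_certify_f3_py (adj : List (Int × List (Int × Int))) (src : Int) (dst : Int) (max_hops : Int) (out : Option (List Int × Int)) : Prop := out = certify_f3_py_alt adj src dst max_hops
instance (adj : List (Int × List (Int × Int))) (src : Int) (dst : Int) (max_hops : Int) (out : Option (List Int × Int)) : Decidable (Spec_certify_f3_py adj src dst max_hops out) := by unfold Spec_certify_f3_py; infer_instance

-- ===== CLAIM (what is proved, stated in full; the proofs are below) =====
def Claim_equal_certify_f3_py : Prop := ∀ (adj : List (Int × List (Int × Int))) (src : Int) (dst : Int) (max_hops : Int), Dom_certify_f3_py adj src dst max_hops → Spec_certify_f3_py adj src dst max_hops (certify_f3_py adj src dst max_hops)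

-- ===== LEMMAS AND PROOFS =====

def pvClosed (v : PySem.Dict Int (Option Int × Int)) : Prop :=
  ∀ n q hh, v.get? n = some (some q, hh) → (v.get? q).isSome

def pvAgree (v v2 : PySem.Dict Int (Option Int × Int)) : Prop :=
  ∀ m e, v.get? m = some e → v2.get? m = some e

-- all neighbour endpoints occurring in the dict
def pvAlb (d : PySem.Dict Int (List (Int × Int))) : List Int :=
  d.items.flatMap (fun it => it.2.map Prod.fst)

theorem pv_recon_agree (v v2 : PySem.Dict Int (Option Int × Int))
    (hC : pvClosed v) (hA : pvAgree v v2) :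
    ∀ f n, (v.get? n).isSome → reconA v2 f n = reconA v f n := by
  intro f
  induction f with
  | zero => intro n _; rfl
  | succ f ih =>
    intro n hn
    obtain ⟨e, he⟩ := Option.isSome_iff_exists.mp hn
    obtain ⟨pr, hh⟩ := e
    cases pr with
    | none => simp [reconA, he, hA n _ he]
    | some q => simp [reconA, he, hA n _ he, ih q (hC n q hh he)]

theorem pv_recon_head (v : PySem.Dict Int (Option Int × Int)) (f : Nat) (n : Int) :
    reconA v (f + 1) n = n :: (reconA v (f + 1) n).tail := by
  cases hv : v.get? n with
  | none => simp [reconA, hv]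
  | some e =>
    obtain ⟨pr, hh⟩ := e
    cases pr <;> simp [reconA, hv]

theorem pv_recon_step (v : PySem.Dict Int (Option Int × Int)) (f : Nat) (n u : Int)
    (hh : Int) (he : v.get? n = some (some u, hh)) :
    reconA v (f + 1) n = n :: reconA v f u := by
  simp [reconA, he]

theorem pv_agree_refl (v : PySem.Dict Int (Option Int × Int)) : pvAgree v v :=
  fun _ _ h => h

theorem pv_agree_trans (v1 v2 v3 : PySem.Dict Int (Option Int × Int))
    (h12 : pvAgree v1 v2) (h23 : pvAgree v2 v3) : pvAgree v1 v3 :=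
  fun m e h => h23 m e (h12 m e h)

theorem pv_agree_isSome (v v2 : PySem.Dict Int (Option Int × Int)) (hA : pvAgree v v2)
    (m : Int) (h : (v.get? m).isSome) : (v2.get? m).isSome := by
  obtain ⟨e, he⟩ := Option.isSome_iff_exists.mp h
  rw [hA m e he]; rfl

theorem pv_agree_insert (v : PySem.Dict Int (Option Int × Int)) (k : Int)
    (e : Option Int × Int) (hk : v.get? k = none) : pvAgree v (v.insert k e) := by
  intro m e' hm
  rw [PySem.Dict.get?_insert]
  split_ifs with h
  · subst h; rw [hk] at hm; cases hm
  · exact hm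

theorem pv_closed_insert (v : PySem.Dict Int (Option Int × Int)) (u k : Int) (hh : Int)
    (hC : pvClosed v) (hu : (v.get? u).isSome) :
    pvClosed (v.insert k (some u, hh)) := by
  intro n q hh' hn
  rw [PySem.Dict.get?_insert] at hn
  rw [PySem.Dict.get?_insert]
  split_ifs at hn with h
  · cases hn
    split_ifs with h2
    · rfl
    · exact hu
  · split_ifs with h2
    · rfl
    · exact hC n q hh' hn

theorem pv_mem_alb (d : PySem.Dict Int (List (Int × Int))) (u : Int) (y : Int × Int)
    (hy : y ∈ d.getD u []) : y.1 ∈ pvAlb d := by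
  rw [PySem.Dict.getD_eq_get?_getD] at hy
  cases hg : d.get? u with
  | none => rw [hg] at hy; cases hy
  | some lst =>
    rw [hg] at hy
    exact List.mem_flatMap.mpr ⟨(u, lst), PySem.Dict.mem_items_of_get?_eq_some d hg,
      List.mem_map.mpr ⟨y, hy, rfl⟩⟩

theorem pvAlb_length (d : PySem.Dict Int (List (Int × Int))) :
    (pvAlb d).length = (d.items.map (fun it => it.2.length)).sum := by
  simp [pvAlb, List.length_flatMap]

theorem pv_nodup_length_le (l w : List Int) (h1 : l.Nodup) (h2 : l ⊆ w) : l.length ≤ w.length :=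
  List.Subperm.length_le (List.subperm_of_subset h1 h2)

theorem pv_foldl_tail (u h : Int) :
    ∀ (nbrs : List (Int × Int)) (v : PySem.Dict Int (Option Int × Int)) (q0 : List (Int × Int)),
    (v.get? u).isSome → pvClosed v →
    ∃ v2 delta, nbrs.foldl (stepA u h) (v, q0) = (v2, q0 ++ delta) ∧ pvAgree v v2 ∧ pvClosed v2 := by
  intro nbrs
  induction nbrs with
  | nil => exact fun v q0 _ hC => ⟨v, [], by simp, pv_agree_refl v, hC⟩
  | cons vi rest ih =>
    intro v q0 hu hC
    by_cases hs : (v.get? vi.1).isSome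
    · simpa [stepA, hs] using ih v q0 hu hC
    · have hk : v.get? vi.1 = none := Option.not_isSome_iff_eq_none.mp hs
      have hag1 : pvAgree v (v.insert vi.1 (some u, h + 1)) := pv_agree_insert v _ _ hk
      obtain ⟨v2, delta, heq, hag, hc2⟩ :=
        ih (v.insert vi.1 (some u, h + 1)) (q0 ++ [(vi.1, h + 1)])
          (pv_agree_isSome _ _ hag1 u hu) (pv_closed_insert v u vi.1 (h + 1) hC hu)
      refine ⟨v2, (vi.1, h + 1) :: delta, ?_, pv_agree_trans _ _ _ hag1 hag, hc2⟩
      simp only [List.foldl_cons, stepA, hs]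
      rw [if_neg (by simp), heq]
      simp

-- A drains a queue whose entries are all at an exhausted hop level
theorem pv_levelNone (d : PySem.Dict Int (List (Int × Int))) (dst mh : Int) :
    ∀ (q : List (Int × Int)) (v : PySem.Dict Int (Option Int × Int)) (fuel : Nat),
    q.length + 1 ≤ fuel → (∀ x ∈ q, x.1 ≠ dst ∧ mh ≤ x.2) →
    loopA d dst mh fuel v q = none := by
  intro q
  induction q with
  | nil =>
    intro v fuel hf _
    cases fuel with
    | zero => omega
    | succ f => rfl
  | cons x rest ih =>
    intro v fuel hf hq
    cases fuel with
    | zero => simp at hf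
    | succ f =>
      obtain ⟨x1, x2⟩ := x
      have h1 := hq (x1, x2) (List.mem_cons_self ..)
      simp only [loopA, if_neg h1.1, if_pos h1.2]
      exact ih v f (by simpa using hf) (fun y hy => hq y (List.mem_cons_of_mem _ hy))

-- once dst sits in the queue with parent recorded, A returns its fixed answer
theorem pv_found (d : PySem.Dict Int (List (Int × Int))) (dst mh : Int) :
    ∀ (q1 : List (Int × Int)) (v : PySem.Dict Int (Option Int × Int)) (fuel : Nat)
      (q2 : List (Int × Int)) (hd : Int),
    q1.length + 1 ≤ fuel →
    (∀ x ∈ q1, x.1 ≠ dst ∧ (v.get? x.1).isSome) →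
    pvClosed v → (v.get? dst).isSome →
    loopA d dst mh fuel v (q1 ++ (dst, hd) :: q2)
      = some ((reconA v (mh.toNat + 2) dst).reverse, hd) := by
  intro q1
  induction q1 with
  | nil =>
    intro v fuel q2 hd hf _ _ _
    cases fuel with
    | zero => omega
    | succ f => simp [loopA]
  | cons x rest ih =>
    intro v fuel q2 hd hf hq hC hdsome
    cases fuel with
    | zero => simp at hf
    | succ f =>
      obtain ⟨x1, x2⟩ := x
      have h1 := hq (x1, x2) (List.mem_cons_self ..)
      by_cases hmh : mh ≤ x2
      · simp only [List.cons_append, loopA, if_neg h1.1, if_pos hmh]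
        exact ih v f q2 hd (by simpa using hf)
          (fun y hy => hq y (List.mem_cons_of_mem _ hy)) hC hdsome
      · simp only [List.cons_append, loopA, if_neg h1.1, if_neg hmh]
        obtain ⟨v2, delta, heq, hag, hc2⟩ :=
          pv_foldl_tail x1 x2 (d.getD x1 []) v (rest ++ (dst, hd) :: q2) h1.2 hC
        rw [heq]
        have hassoc : (rest ++ (dst, hd) :: q2) ++ delta = rest ++ (dst, hd) :: (q2 ++ delta) := by
          simp
        rw [hassoc]
        rw [ih v2 f (q2 ++ delta) hd (by simpa using hf)
          (fun y hy => ⟨(hq y (List.mem_cons_of_mem _ hy)).1,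
            pv_agree_isSome _ _ hag y.1 (hq y (List.mem_cons_of_mem _ hy)).2⟩)
          hc2 (pv_agree_isSome _ _ hag dst hdsome)]
        rw [pv_recon_agree v v2 hC hag _ dst hdsome]

theorem pv_loopA_nil (d : PySem.Dict Int (List (Int × Int))) (dst mh : Int)
    (f : Nat) (v : PySem.Dict Int (Option Int × Int)) :
    loopA d dst mh f v [] = none := by
  cases f <;> rfl

theorem pv_buildL_extends (d : PySem.Dict Int (List (Int × Int))) :
    ∀ (f : Nat) (seen : PySem.Set Int) (accRev : List (List Int)),
    ∃ E, buildL d f seen accRev = E ++ accRev := by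
  intro f
  induction f with
  | zero => exact fun seen accRev => ⟨[], rfl⟩
  | succ f ih =>
    intro seen accRev
    simp only [buildL]
    split_ifs with h
    · exact ⟨[], rfl⟩
    · obtain ⟨E, hE⟩ := ih (expandL d (accRev.headD []) seen).1
        ((expandL d (accRev.headD []) seen).2 :: accRev)
      refine ⟨E ++ [(expandL d (accRev.headD []) seen).2], ?_⟩
      rw [List.append_assoc]
      simpa using hE

theorem pv_lcontains_true {l : List Int} {x : Int} (h : x ∈ l) : l.contains x = true := by
  simp [h]

theorem pv_lcontains_false {l : List Int} {x : Int} (h : x ∉ l) : l.contains x = false := by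
  simp [h]

theorem pv_findK_append (dst : Int) :
    ∀ (L1 L2 : List (List Int)) (i : Nat), (∀ l ∈ L1, dst ∉ l) →
    findK dst (L1 ++ L2) i = findK dst L2 (i + L1.length) := by
  intro L1
  induction L1 with
  | nil => intro L2 i _; simp
  | cons l rest ih =>
    intro L2 i hmem
    have hc : l.contains dst = false := pv_lcontains_false (hmem l (List.mem_cons_self ..))
    simp only [List.cons_append, findK, hc, Bool.false_eq_true, if_false]
    rw [ih L2 (i + 1) (fun l' hl' => hmem l' (List.mem_cons_of_mem _ hl'))]
    congr 1
    simp
    omega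

theorem pv_findK_ge (dst : Int) :
    ∀ (L : List (List Int)) (i j : Nat), findK dst L i = some j → i ≤ j := by
  intro L
  induction L with
  | nil => intro i j h; simp [findK] at h
  | cons l rest ih =>
    intro i j h
    simp only [findK] at h
    split_ifs at h with hc
    · cases h; omega
    · have := ih (i + 1) j h; omega

theorem pv_pickB_mem (d : PySem.Dict Int (List (Int × Int))) (cur : Int) :
    ∀ (l : List Int) (u : Int), pickB d cur l = some u → u ∈ l := by
  intro l
  induction l with
  | nil => intro u h; simp [pickB] at h
  | cons x rest ih =>
    intro u h
    simp only [pickB] at h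
    split_ifs at h with hc
    · cases h; exact List.mem_cons_self ..
    · exact List.mem_cons_of_mem _ (ih u h)

theorem pv_any_true (d : PySem.Dict Int (List (Int × Int))) (u x : Int)
    (h : x ∈ (d.getD u []).map Prod.fst) :
    (d.getD u []).any (fun vi => vi.1 == x) = true := by
  obtain ⟨vi, hvi, rfl⟩ := List.mem_map.mp h
  exact List.any_eq_true.mpr ⟨vi, hvi, by simp⟩

theorem pv_any_false (d : PySem.Dict Int (List (Int × Int))) (u x : Int)
    (h : x ∉ (d.getD u []).map Prod.fst) :
    (d.getD u []).any (fun vi => vi.1 == x) = false := by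
  rw [List.any_eq_false]
  intro vi hvi
  simp only [beq_iff_eq]
  intro hx
  exact h (List.mem_map.mpr ⟨vi, hvi, hx⟩)

-- one neighbour-list pass: A's fold and B's fold add the same fresh nodes in the same order
theorem pv_exp (u h : Int) :
    ∀ (nbrs : List (Int × Int)) (v : PySem.Dict Int (Option Int × Int)) (seen : PySem.Set Int)
      (q0 : List (Int × Int)) (nxt0 : List Int),
    (∀ x : Int, x ∈ seen ↔ (v.get? x).isSome = true) → pvClosed v → (v.get? u).isSome →
    ∃ v2 seen2 delta,
      nbrs.foldl (stepA u h) (v, q0) = (v2, q0 ++ delta.map (fun x => (x, h + 1))) ∧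
      nbrs.foldl stepL (seen, nxt0) = (seen2, nxt0 ++ delta) ∧
      (∀ x : Int, x ∈ seen2 ↔ (v2.get? x).isSome = true) ∧
      pvClosed v2 ∧ pvAgree v v2 ∧ delta.Nodup ∧
      (∀ x ∈ delta, v.get? x = none ∧ v2.get? x = some (some u, h + 1) ∧ x ∈ nbrs.map Prod.fst) ∧
      (∀ x, (v2.get? x).isSome → (v.get? x).isSome ∨ x ∈ delta) ∧
      (∀ vi ∈ nbrs, (v2.get? vi.1).isSome) := by
  intro nbrs
  induction nbrs with
  | nil =>
    intro v seen q0 nxt0 hKE hC hu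
    exact ⟨v, seen, [], by simp, by simp, hKE, hC, pv_agree_refl v, by simp, by simp,
      fun x hx => Or.inl hx, by simp⟩
  | cons vi rest ih =>
    intro v seen q0 nxt0 hKE hC hu
    by_cases hs : (v.get? vi.1).isSome
    · have hsc : vi.1 ∈ seen := (hKE vi.1).mpr hs
      obtain ⟨v2, seen2, delta, hA, hB, hKE2, hC2, hag, hnd, hdel, hK, hall⟩ :=
        ih v seen q0 nxt0 hKE hC hu
      refine ⟨v2, seen2, delta, ?_, ?_, hKE2, hC2, hag, hnd, ?_, hK, ?_⟩
      · simpa [stepA, hs] using hA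
      · simpa [stepL, hsc] using hB
      · intro x hx
        exact ⟨(hdel x hx).1, (hdel x hx).2.1, List.mem_cons_of_mem _ (hdel x hx).2.2⟩
      · intro w hw
        rcases List.mem_cons.mp hw with hw1 | hw2
        · subst hw1; exact pv_agree_isSome _ _ hag _ hs
        · exact hall w hw2
    · have hk : v.get? vi.1 = none := Option.not_isSome_iff_eq_none.mp hs
      have hsc : vi.1 ∉ seen := fun hmem => hs ((hKE vi.1).mp hmem)
      have hag1 : pvAgree v (v.insert vi.1 (some u, h + 1)) := pv_agree_insert v _ _ hk
      have hKE' : ∀ x : Int, x ∈ seen.add vi.1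
          ↔ ((v.insert vi.1 (some u, h + 1)).get? x).isSome = true := by
        intro x
        rw [PySem.Set.mem_add, PySem.Dict.get?_insert]
        by_cases hx : x = vi.1
        · subst hx; simp
        · simp [hx, hKE x]
      obtain ⟨v2, seen2, delta, hA, hB, hKE2, hC2, hag, hnd, hdel, hK, hall⟩ :=
        ih (v.insert vi.1 (some u, h + 1)) (seen.add vi.1)
          (q0 ++ [(vi.1, h + 1)]) (nxt0 ++ [vi.1]) hKE'
          (pv_closed_insert v u vi.1 (h + 1) hC hu) (pv_agree_isSome _ _ hag1 u hu)
      have hvi2 : v2.get? vi.1 = some (some u, h + 1) :=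
        hag vi.1 _ (PySem.Dict.get?_insert_self ..)
      have hfresh : vi.1 ∉ delta := by
        intro hmem
        have := (hdel vi.1 hmem).1
        rw [PySem.Dict.get?_insert_self] at this; cases this
      refine ⟨v2, seen2, vi.1 :: delta, ?_, ?_, hKE2, hC2,
        pv_agree_trans _ _ _ hag1 hag, List.nodup_cons.mpr ⟨hfresh, hnd⟩, ?_, ?_, ?_⟩
      · simp only [List.foldl_cons, stepA, hs]
        rw [if_neg (by simp), hA]; simp
      · have hst : stepL (seen, nxt0) vi = (seen.add vi.1, nxt0 ++ [vi.1]) := by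
          simp [stepL, hsc]
        rw [List.foldl_cons, hst, hB]; simp
      · intro x hx
        rcases List.mem_cons.mp hx with hx1 | hx2
        · subst hx1
          exact ⟨hk, hvi2, List.mem_cons_self ..⟩
        · obtain ⟨ha, hb, hc⟩ := hdel x hx2
          refine ⟨?_, hb, List.mem_cons_of_mem _ hc⟩
          cases hvx : v.get? x with
          | none => rfl
          | some e => rw [hag1 x e hvx] at ha; cases ha
      · intro x hx
        rcases hK x hx with hx1 | hx2
        · rw [PySem.Dict.get?_insert] at hx1
          split_ifs at hx1 with hxe
          · subst hxe; exact Or.inr (List.mem_cons_self ..)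
          · exact Or.inl hx1
        · exact Or.inr (List.mem_cons_of_mem _ hx2)
      · intro w hw
        rcases List.mem_cons.mp hw with hw1 | hw2
        · subst hw1
          rw [hvi2]; rfl
        · exact hall w hw2

-- one level of A's queue loop against one frontier pass of B's layer builder
theorem pv_inner (d : PySem.Dict Int (List (Int × Int))) (dst mh h : Int)
    (vS : PySem.Dict Int (Option Int × Int)) (fr : List Int) (low : List (List Int))
    (hSC : pvClosed vS)
    (hfrKS : ∀ x ∈ fr, (vS.get? x).isSome)
    (hSd : vS.get? dst = none)
    (hhm : h < mh) :
    ∀ (frR : List Int) (v : PySem.Dict Int (Option Int × Int)) (seen : PySem.Set Int)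
      (nxt : List Int) (fuel : Nat),
    frR ⊆ fr →
    (∀ x : Int, x ∈ seen ↔ (v.get? x).isSome = true) →
    pvClosed v → pvAgree vS v →
    (∀ x ∈ frR, (v.get? x).isSome) →
    nxt.Nodup → (∀ x ∈ nxt, (v.get? x).isSome) → (∀ x ∈ nxt, x ∈ pvAlb d) →
    (∀ x ∈ nxt, ∃ u, pickB d x fr = some u ∧ v.get? x = some (some u, h + 1) ∧ (vS.get? u).isSome) →
    (∀ x, v.get? x = none → pickB d x fr = pickB d x frR) →
    frR.length + (pvAlb d).length + 2 ≤ fuel →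
    ∃ (v2 : PySem.Dict Int (Option Int × Int)) (seen2 : PySem.Set Int) (delta : List Int),
      frR.foldl (fun st u => (d.getD u []).foldl stepL st) (seen, nxt) = (seen2, nxt ++ delta) ∧
      (∀ x : Int, x ∈ seen2 ↔ (v2.get? x).isSome = true) ∧
      pvClosed v2 ∧ pvAgree v v2 ∧
      (nxt ++ delta).Nodup ∧
      (∀ x ∈ nxt ++ delta, (v2.get? x).isSome) ∧
      (∀ x ∈ delta, x ∈ pvAlb d) ∧
      (∀ x ∈ delta, v.get? x = none) ∧
      (∀ x, (v2.get? x).isSome → (v.get? x).isSome ∨ x ∈ delta) ∧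
      (∀ x ∈ nxt ++ delta, ∃ u, pickB d x fr = some u ∧ v2.get? x = some (some u, h + 1) ∧ (vS.get? u).isSome) ∧
      (dst ∈ nxt ++ delta →
        ∀ u, pickB d dst fr = some u →
        loopA d dst mh fuel v (frR.map (fun x => (x, h)) ++ nxt.map (fun x => (x, h + 1)))
          = some ((dst :: reconA vS (mh.toNat + 1) u).reverse, h + 1)) ∧
      (dst ∉ nxt ++ delta →
        loopA d dst mh fuel v (frR.map (fun x => (x, h)) ++ nxt.map (fun x => (x, h + 1)))
          = loopA d dst mh (fuel - frR.length) v2 ((nxt ++ delta).map (fun x => (x, h + 1)))) := by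
  intro frR
  induction frR with
  | nil =>
    intro v seen nxt fuel hsub hKE hC hagS hfrK hnn hnk hna hnp hP2 hfuel
    refine ⟨v, seen, [], by simp, hKE, hC, pv_agree_refl v, by simpa using hnn,
      by simpa using hnk, by simp, by simp, fun x hx => Or.inl hx, by simpa using hnp, ?_, ?_⟩
    · intro hdst u hpick
      have hdst' : dst ∈ nxt := by simpa using hdst
      obtain ⟨n1, n2, hsplit⟩ := List.append_of_mem hdst'
      subst hsplit
      have hmid := List.nodup_middle.mp hnn
      have hn1 : ∀ x ∈ n1, x ≠ dst := by
        intro x hx hxd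
        subst hxd
        exact (List.nodup_cons.mp hmid).1 (List.mem_append.mpr (Or.inl hx))
      obtain ⟨u', hpick', hentry, huK⟩ := hnp dst hdst'
      have huu : u' = u := by
        rw [hpick'] at hpick; exact Option.some.inj hpick
      subst huu
      have hfuel' : (pvAlb d).length + 2 ≤ fuel := by simpa using hfuel
      have hnl : (n1 ++ dst :: n2).length ≤ (pvAlb d).length :=
        pv_nodup_length_le _ _ hnn (fun x hx => hna x hx)
      have hlen1 : n1.length + 1 ≤ fuel := by
        have h1 : n1.length ≤ (n1 ++ dst :: n2).length := by simp
        omega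
      rw [List.map_nil, List.nil_append, List.map_append, List.map_cons]
      rw [pv_found d dst mh (n1.map (fun x => (x, h + 1))) v fuel
          (n2.map (fun x => (x, h + 1))) (h + 1) (by simpa using hlen1) ?_ hC
          (by rw [hentry]; rfl)]
      · have hrec : reconA v (mh.toNat + 2) dst = dst :: reconA v (mh.toNat + 1) u' :=
          pv_recon_step v (mh.toNat + 1) dst u' (h + 1) hentry
        rw [hrec, pv_recon_agree vS v hSC hagS (mh.toNat + 1) u' huK]
      · intro x hx
        obtain ⟨y, hy, rfl⟩ := List.mem_map.mp hx
        exact ⟨hn1 y hy, hnk y (List.mem_append.mpr (Or.inl hy))⟩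
    · intro _
      simp
  | cons u0 rest ih =>
    intro v seen nxt fuel hsub hKE hC hagS hfrK hnn hnk hna hnp hP2 hfuel
    have hu0fr : u0 ∈ fr := hsub (List.mem_cons_self ..)
    have hu0K : (v.get? u0).isSome := hfrK u0 (List.mem_cons_self ..)
    obtain ⟨v', seen', delta0, hA, hB, hKE', hC', hag', hnd0, hdel0, hKk, hall⟩ :=
      pv_exp u0 h (d.getD u0 []) v seen
        (rest.map (fun x => (x, h)) ++ nxt.map (fun x => (x, h + 1))) nxt hKE hC hu0K
    have hfresh0 : ∀ x ∈ delta0, v.get? x = none := fun x hx => (hdel0 x hx).1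
    cases fuel with
    | zero => omega
    | succ f =>
      have hP2' : ∀ x, v'.get? x = none → pickB d x fr = pickB d x rest := by
        intro x hx
        have hxv : v.get? x = none := by
          cases hvx : v.get? x with
          | none => rfl
          | some e => rw [hag' x e hvx] at hx; cases hx
        rw [hP2 x hxv]
        have hnb : x ∉ (d.getD u0 []).map Prod.fst := by
          intro hmem
          obtain ⟨vi, hvi, hvieq⟩ := List.mem_map.mp hmem
          have := hall vi hvi
          rw [hvieq, hx] at this
          cases this
        simp only [pickB]
        rw [pv_any_false d u0 x hnb]
        simp
      obtain ⟨v2, seen2, delta', hfold, hKE2, hC2, hag2, hnd2, hk2, halb2, hfresh2, hK2,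
          hpick2, hfound, hcont⟩ :=
        ih v' seen' (nxt ++ delta0) f (fun x hx => hsub (List.mem_cons_of_mem _ hx)) hKE' hC'
          (pv_agree_trans _ _ _ hagS hag')
          (fun x hx => pv_agree_isSome _ _ hag' x (hfrK x (List.mem_cons_of_mem _ hx)))
          (by
            refine List.Nodup.append hnn hnd0 ?_
            intro x hx1 hx2
            have h1 := hnk x hx1
            have h2 := hfresh0 x hx2
            rw [h2] at h1; cases h1)
          (by
            intro x hx
            rcases List.mem_append.mp hx with hx1 | hx2
            · exact pv_agree_isSome _ _ hag' x (hnk x hx1)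
            · rw [(hdel0 x hx2).2.1]; rfl)
          (by
            intro x hx
            rcases List.mem_append.mp hx with hx1 | hx2
            · exact hna x hx1
            · obtain ⟨vi, hvi, hvieq⟩ := List.mem_map.mp (hdel0 x hx2).2.2
              exact hvieq ▸ pv_mem_alb d u0 vi hvi)
          (by
            intro x hx
            rcases List.mem_append.mp hx with hx1 | hx2
            · obtain ⟨u, hu1, hu2, hu3⟩ := hnp x hx1
              exact ⟨u, hu1, hag' x _ hu2, hu3⟩
            · refine ⟨u0, ?_, (hdel0 x hx2).2.1, hfrKS u0 hu0fr⟩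
              rw [hP2 x (hfresh0 x hx2)]
              simp only [pickB]
              rw [pv_any_true d u0 x (hdel0 x hx2).2.2]
              simp)
          hP2'
          (by simp only [List.length_cons] at hfuel; omega)
      have hqueue : (rest.map (fun x => (x, h)) ++ nxt.map (fun x => (x, h + 1)))
          ++ delta0.map (fun x => (x, h + 1))
          = rest.map (fun x => (x, h)) ++ (nxt ++ delta0).map (fun x => (x, h + 1)) := by
        simp
      have hu0ne : u0 ≠ dst := by
        intro hx
        have := hfrKS u0 hu0fr
        rw [hx, hSd] at this; cases this
      have hstep : loopA d dst mh (f + 1) v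
          ((u0 :: rest).map (fun x => (x, h)) ++ nxt.map (fun x => (x, h + 1)))
          = loopA d dst mh f v' (rest.map (fun x => (x, h)) ++ (nxt ++ delta0).map (fun x => (x, h + 1))) := by
        rw [List.map_cons, List.cons_append]
        simp only [loopA, if_neg hu0ne, if_neg (show ¬ mh ≤ h by omega), hA]
        rw [hqueue]
      have hbfold : (u0 :: rest).foldl (fun st u => (d.getD u []).foldl stepL st) (seen, nxt)
          = (seen2, nxt ++ (delta0 ++ delta')) := by
        rw [List.foldl_cons, hB, hfold, List.append_assoc]
      refine ⟨v2, seen2, delta0 ++ delta', hbfold, hKE2, hC2,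
        pv_agree_trans _ _ _ hag' hag2, by rw [← List.append_assoc]; exact hnd2,
        ?_, ?_, ?_, ?_, ?_, ?_, ?_⟩
      · intro x hx
        exact hk2 x (by rw [← List.append_assoc] at hx; exact hx)
      · intro x hx
        rcases List.mem_append.mp hx with hx1 | hx2
        · obtain ⟨vi, hvi, hvieq⟩ := List.mem_map.mp (hdel0 x hx1).2.2
          exact hvieq ▸ pv_mem_alb d u0 vi hvi
        · exact halb2 x hx2
      · intro x hx
        rcases List.mem_append.mp hx with hx1 | hx2
        · exact hfresh0 x hx1
        · have := hfresh2 x hx2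
          cases hvx : v.get? x with
          | none => rfl
          | some e => rw [hag' x e hvx] at this; cases this
      · intro x hx
        rcases hK2 x hx with hx1 | hx2
        · rcases hKk x hx1 with hy1 | hy2
          · exact Or.inl hy1
          · exact Or.inr (List.mem_append.mpr (Or.inl hy2))
        · exact Or.inr (List.mem_append.mpr (Or.inr hx2))
      · intro x hx
        exact hpick2 x (by rw [← List.append_assoc] at hx; exact hx)
      · intro hdst u hpick
        rw [hstep]
        exact hfound (by rw [← List.append_assoc] at hdst; exact hdst) u hpick
      · intro hdst
        rw [hstep, hcont (by rw [← List.append_assoc] at hdst; exact hdst)]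
        have : f - rest.length = f + 1 - (u0 :: rest).length := by
          simp only [List.length_cons]
          omega
        rw [← List.append_assoc, ← this]

-- the main simulation: A's queue loop from a level start equals B's build-then-query
theorem pv_main (d : PySem.Dict Int (List (Int × Int))) (src dst mh : Int) :
    ∀ (L : Nat) (v : PySem.Dict Int (Option Int × Int)) (seen : PySem.Set Int)
      (fr : List Int) (low : List (List Int)) (h : Int) (fuel fB : Nat) (sl : List Int),
    L = (mh - h).toNat →
    fr.length + 1 + L * ((pvAlb d).length + 2) ≤ fuel →
    (∀ x : Int, x ∈ seen ↔ (v.get? x).isSome = true) →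
    pvClosed v → v.get? dst = none →
    (∀ x ∈ fr, (v.get? x).isSome) →
    fr.Nodup → (∀ x ∈ fr, x ∈ src :: pvAlb d) →
    (∀ l ∈ (fr :: low), ∀ x ∈ l, (v.get? x).isSome) →
    ((fr :: low).length : Int) = h + 1 → 0 ≤ h →
    (∀ x ∈ fr, ∀ (path : List Int) (f : Nat), (fr :: low).length ≤ f →
        bwdB d low x path = path ++ (reconA v f x).tail) →
    sl.Nodup → (∀ x : Int, x ∈ sl ↔ (v.get? x).isSome = true) → sl ⊆ src :: pvAlb d →
    (src :: pvAlb d).length + 1 ≤ fB + sl.length →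
    loopA d dst mh fuel v (fr.map (fun x => (x, h))) =
      (match findK dst ((buildL d fB seen (fr :: low)).reverse) 0 with
       | none => none
       | some k =>
         if 0 < k ∧ mh < (k : Int) then none
         else some ((bwdB d ((((buildL d fB seen (fr :: low)).reverse).take k).reverse) dst [dst]).reverse, (k : Int))) := by
  intro L
  induction L with
  | zero =>
    intro v seen fr low h fuel fB sl hL hfuel hKE hC hdst hfrK hfn hfw hlay hlen hh0 hR1
      hsln hsli hslw hslB
    have hmh : mh ≤ h := by omega
    have hnotin : ∀ l ∈ (fr :: low).reverse, dst ∉ l := by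
      intro l hl hmem
      have := hlay l (List.mem_reverse.mp hl) dst hmem
      rw [hdst] at this; cases this
    obtain ⟨E, hE⟩ := pv_buildL_extends d fB seen (fr :: low)
    rw [pv_levelNone d dst mh (fr.map (fun x => (x, h))) v fuel (by simpa using hfuel) ?_]
    · rw [hE, List.reverse_append, pv_findK_append dst ((fr :: low).reverse) E.reverse 0 hnotin]
      cases hk : findK dst E.reverse (0 + ((fr :: low).reverse).length) with
      | none => rfl
      | some j =>
        have hge := pv_findK_ge dst E.reverse _ j hk
        simp only [List.length_reverse, List.length_cons, Nat.zero_add] at hge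
        simp only [List.length_cons] at hlen
        have hj1 : 0 < j := by omega
        have hj2 : mh < (j : Int) := by omega
        dsimp only
        rw [if_pos (And.intro hj1 hj2)]
    · intro x hx
      obtain ⟨y, hy, rfl⟩ := List.mem_map.mp hx
      refine ⟨?_, hmh⟩
      intro hyd
      have := hfrK y hy
      rw [show y = dst from hyd, hdst] at this; cases this
  | succ L ihL =>
    intro v seen fr low h fuel fB sl hL hfuel hKE hC hdst hfrK hfn hfw hlay hlen hh0 hR1
      hsln hsli hslw hslB
    have hhm : h < mh := by omega
    have hX : (L + 1) * ((pvAlb d).length + 2)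
        = L * ((pvAlb d).length + 2) + ((pvAlb d).length + 2) := Nat.succ_mul ..
    obtain ⟨v2, seen2, delta, hfold, hKE2, hC2, hag2, hnd2, hk2, halb2, hfresh2, hK2,
        hpick2, hfound, hcont⟩ :=
      pv_inner d dst mh h v fr low hC hfrK hdst hhm fr v seen [] fuel
        (fun x hx => hx) hKE hC (pv_agree_refl v) hfrK (by simp) (by simp) (by simp)
        (by simp) (fun x _ => rfl) (by omega)
    have hexp : expandL d fr seen = (seen2, delta) := by
      simp only [expandL]
      rw [hfold]
      simp
    have hslen : sl.length ≤ (src :: pvAlb d).length := pv_nodup_length_le sl _ hsln hslw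
    cases fB with
    | zero => omega
    | succ fb =>
      have hbuild : buildL d (fb + 1) seen (fr :: low)
          = if delta = [] then fr :: low else buildL d fb seen2 (delta :: fr :: low) := by
        simp only [buildL, List.headD_cons, hexp]
      have hnotin : ∀ l ∈ (fr :: low).reverse, dst ∉ l := by
        intro l hl hmem
        have := hlay l (List.mem_reverse.mp hl) dst hmem
        rw [hdst] at this; cases this
      rw [hbuild]
      by_cases hde : delta = []
      · subst hde
        rw [if_pos rfl]
        have hnone := hcont (by simp)
        simp only [List.map_nil, List.append_nil] at hnone
        rw [hnone, pv_loopA_nil]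
        have hfind : findK dst ((fr :: low).reverse) 0 = none := by
          rw [(List.append_nil ((fr :: low).reverse)).symm,
            pv_findK_append dst ((fr :: low).reverse) [] 0 hnotin]
          rfl
        rw [hfind]
      · rw [if_neg hde]
        have hdeltaK : ∀ x ∈ delta, (v2.get? x).isSome := by
          intro x hx; exact hk2 x (by simpa using hx)
        obtain ⟨E, hE⟩ := pv_buildL_extends d fb seen2 (delta :: fr :: low)
        have hrev : (E ++ delta :: fr :: low).reverse
            = (fr :: low).reverse ++ ([delta] ++ E.reverse) := by
          simp
        by_cases hdd : dst ∈ delta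
        · -- dst discovered at this level
          obtain ⟨u, hpick, hentry, huK⟩ := hpick2 dst (by simpa using hdd)
          have hAval := hfound (by simpa using hdd) u hpick
          simp only [List.map_nil, List.append_nil] at hAval
          have hkeq : findK dst ((buildL d fb seen2 (delta :: fr :: low)).reverse) 0
              = some ((fr :: low).length) := by
            rw [hE, hrev, pv_findK_append dst ((fr :: low).reverse) ([delta] ++ E.reverse) 0 hnotin]
            simp only [List.singleton_append, findK, pv_lcontains_true hdd, if_true]
            simp
          have htake : (((buildL d fb seen2 (delta :: fr :: low)).reverse).take
              ((fr :: low).length)).reverse = fr :: low := by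
            rw [hE, hrev, show (fr :: low).length = ((fr :: low).reverse).length by simp,
              List.take_left]
            simp
          have hbwd : bwdB d (fr :: low) dst [dst] = dst :: reconA v (mh.toNat + 1) u := by
            simp only [bwdB, hpick]
            have hkle : (fr :: low).length ≤ mh.toNat + 1 := by
              simp only [List.length_cons] at hlen ⊢
              omega
            rw [hR1 u (pv_pickB_mem d dst fr u hpick) ([dst] ++ [u]) (mh.toNat + 1) hkle]
            conv_rhs => rw [pv_recon_head v mh.toNat u]
            simp
          have hcond : ¬ (0 < (fr :: low).length ∧ mh < (((fr :: low).length : Nat) : Int)) := by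
            intro hcc
            have := hcc.2
            rw [hlen] at this
            omega
          rw [hAval]
          simp only [hkeq]
          rw [if_neg hcond, htake, hbwd, hlen]
        · -- recurse to the next level
          have hAval := hcont (by simpa using hdd)
          simp only [List.map_nil, List.append_nil, List.nil_append] at hAval
          rw [hAval]
          have hdst2 : v2.get? dst = none := by
            cases hv : v2.get? dst with
            | none => rfl
            | some e =>
              rcases hK2 dst (by rw [hv]; rfl) with h1 | h2
              · rw [hdst] at h1; cases h1
              · exact absurd h2 hdd
          have hdn : delta.Nodup := by simpa using hnd2
          have hdl : delta.length ≤ (pvAlb d).length := pv_nodup_length_le delta _ hdn halb2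
          have hdpos : 0 < delta.length := by
            cases delta with
            | nil => exact absurd rfl hde
            | cons a l => simp
          refine ihL v2 seen2 delta (fr :: low) (h + 1) (fuel - fr.length) fb (sl ++ delta)
            (by omega) (by omega) hKE2 hC2 hdst2 hdeltaK hdn
            (fun x hx => List.mem_cons_of_mem _ (halb2 x hx)) ?_ ?_ (by omega) ?_ ?_ ?_ ?_ ?_
          · intro l hl
            rcases List.mem_cons.mp hl with h1 | h2
            · subst h1; exact hdeltaK
            · exact fun x hx => pv_agree_isSome _ _ hag2 x (hlay l h2 x hx)
          · simp only [List.length_cons] at hlen ⊢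
            push_cast at hlen ⊢
            omega
          · -- the backward-search invariant for the next level
            intro x hx path f hf
            obtain ⟨u, hpick, hentry, huK⟩ := hpick2 x (by simpa using hx)
            cases f with
            | zero => simp at hf
            | succ g =>
              have hg : (fr :: low).length ≤ g := by
                simp only [List.length_cons] at hf ⊢
                omega
              cases g with
              | zero => simp at hg
              | succ g' =>
                have e1 : bwdB d (fr :: low) x path
                    = (path ++ [u]) ++ (reconA v (g' + 1) u).tail := by
                  simp only [bwdB, hpick]
                  exact hR1 u (pv_pickB_mem d x fr u hpick) (path ++ [u]) (g' + 1) hg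
                rw [e1]
                rw [pv_recon_step v2 (g' + 1) x u (h + 1) hentry]
                simp only [List.tail_cons]
                rw [pv_recon_agree v v2 hC hag2 (g' + 1) u huK]
                conv_rhs => rw [pv_recon_head v g' u]
                simp
          · exact List.Nodup.append hsln hdn (by
              intro x hx1 hx2
              have h1 := (hsli x).mp hx1
              have h2 := hfresh2 x hx2
              rw [h2] at h1; cases h1)
          · intro x
            constructor
            · intro hx
              rcases List.mem_append.mp hx with hx1 | hx2
              · exact pv_agree_isSome _ _ hag2 x ((hsli x).mp hx1)
              · exact hdeltaK x hx2
            · intro hx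
              rcases hK2 x hx with h1 | h2
              · exact List.mem_append.mpr (Or.inl ((hsli x).mpr h1))
              · exact List.mem_append.mpr (Or.inr h2)
          · intro x hx
            rcases List.mem_append.mp hx with hx1 | hx2
            · exact hslw hx1
            · exact List.mem_cons_of_mem _ (halb2 x hx2)
          · simp only [List.length_append]
            omega

-- ===== VERDICT (by name: the statement is the Claim_ definition above) =====
theorem certify_f3_py_spec : Claim_equal_certify_f3_py := by
  intro adj src dst max_hops _
  show certify_f3_py adj src dst max_hops = certify_f3_py_alt adj src dst max_hops
  unfold certify_f3_py certify_f3_py_alt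
  by_cases hb : (!(PySem.Dict.ofList adj).contains src
      || !(PySem.Dict.ofList adj).contains dst) = true
  · simp only [hb, if_true]
  · simp only [hb]
    have hfg : 2 ≤ fuelA (PySem.Dict.ofList adj) max_hops := by
      have h2 : 1 * 2 ≤ (max_hops.toNat + 1)
          * (((PySem.Dict.ofList adj).items.map (fun it => it.2.length)).sum + 2) :=
        Nat.mul_le_mul (by omega) (by omega)
      simpa [fuelA] using h2
    by_cases hsd : src = dst
    · subst hsd
      obtain ⟨f, hf⟩ : ∃ f, fuelA (PySem.Dict.ofList adj) max_hops = f + 1 :=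
        ⟨fuelA (PySem.Dict.ofList adj) max_hops - 1, by omega⟩
      rw [hf]
      have hrec : reconA ((PySem.Dict.empty).insert src ((none : Option Int), (0 : Int)))
          (max_hops.toNat + 2) src = [src] := by
        show reconA _ (max_hops.toNat + 1 + 1) src = [src]
        simp [reconA, PySem.Dict.get?_insert_self]
      obtain ⟨E, hE⟩ := pv_buildL_extends (PySem.Dict.ofList adj)
        (fuelB (PySem.Dict.ofList adj)) (PySem.Set.ofList [src]) [[src]]
      rw [hE]
      have hrev : (E ++ [[src]]).reverse = [src] :: E.reverse := by simp
      rw [hrev]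
      have hfind : findK src ([src] :: E.reverse) 0 = some 0 := by
        simp only [findK, pv_lcontains_true (List.mem_singleton.mpr rfl), if_true]
      simp only [loopA, hrec, hfind]
      rw [if_neg (by simp)]
      simp [bwdB]
    · -- src ≠ dst: run the level simulation from the initial state
      have hKE0 : ∀ x : Int, x ∈ PySem.Set.ofList [src]
          ↔ (((PySem.Dict.empty).insert src ((none : Option Int), (0 : Int))).get? x).isSome = true := by
        intro x
        rw [PySem.Set.mem_ofList, PySem.Dict.get?_insert]
        by_cases hx : x = src
        · subst hx; simp
        · simp [hx, PySem.Dict.get?_empty]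
      have hC0 : pvClosed ((PySem.Dict.empty).insert src ((none : Option Int), (0 : Int))) := by
        intro n q hh hn
        rw [PySem.Dict.get?_insert] at hn
        split_ifs at hn with h1
        · simp at hn
        · simp [PySem.Dict.get?_empty] at hn
      have hd0 : ((PySem.Dict.empty).insert src ((none : Option Int), (0 : Int))).get? dst = none := by
        rw [PySem.Dict.get?_insert, if_neg (fun hx => hsd hx.symm)]
        exact PySem.Dict.get?_empty ..
      have hsrcK : (((PySem.Dict.empty).insert src ((none : Option Int), (0 : Int))).get? src).isSome := by
        simp [PySem.Dict.get?_insert_self]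
      have hMS := pvAlb_length (PySem.Dict.ofList adj)
      have hmain := pv_main (PySem.Dict.ofList adj) src dst max_hops max_hops.toNat
        ((PySem.Dict.empty).insert src ((none : Option Int), (0 : Int)))
        (PySem.Set.ofList [src]) [src] [] 0
        (fuelA (PySem.Dict.ofList adj) max_hops) (fuelB (PySem.Dict.ofList adj)) [src]
        (by omega)
        (by
          have hX : (max_hops.toNat + 1) * ((pvAlb (PySem.Dict.ofList adj)).length + 2)
              = max_hops.toNat * ((pvAlb (PySem.Dict.ofList adj)).length + 2)
                + ((pvAlb (PySem.Dict.ofList adj)).length + 2) := Nat.succ_mul ..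
          have hfa : fuelA (PySem.Dict.ofList adj) max_hops
              = (max_hops.toNat + 1) * ((pvAlb (PySem.Dict.ofList adj)).length + 2) := by
            rw [fuelA, hMS]
          simp only [List.length_cons, List.length_nil]
          omega)
        hKE0 hC0 hd0
        (by intro x hx; simp only [List.mem_singleton] at hx; subst hx; exact hsrcK)
        (by simp)
        (by intro x hx; simp only [List.mem_singleton] at hx; subst hx; exact List.mem_cons_self ..)
        (by
          intro l hl x hx
          simp only [List.mem_singleton] at hl
          subst hl
          simp only [List.mem_singleton] at hx
          subst hx
          exact hsrcK)
        (by simp)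
        (by omega)
        (by
          intro x hx path f hf
          simp only [List.mem_singleton] at hx
          cases f with
          | zero => simp at hf
          | succ g =>
            have hrx : reconA ((PySem.Dict.empty).insert src ((none : Option Int), (0 : Int)))
                (g + 1) x = [x] := by
              rw [hx]
              simp [reconA, PySem.Dict.get?_insert_self]
            rw [hrx]
            simp [bwdB])
        (by simp)
        hKE0
        (by intro x hx; simp only [List.mem_singleton] at hx; subst hx; exact List.mem_cons_self ..)
        (by
          have : fuelB (PySem.Dict.ofList adj) = (pvAlb (PySem.Dict.ofList adj)).length + 1 := by
            rw [fuelB, hMS]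
          simp only [List.length_cons]
          omega)
      simpa using hmain
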